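-- pv_equiv track=rewrite | github.com/hyungmogu/algorithm-exercises | Programmers/2_조이스틱/main.py | solution
-- ===== SOURCE A (Python) =====
-- def solution(name):
--     my_index = 0
--     my_name = ["A"] * len(name)
--     completed_count = 0
--     total_moves = 0
--     N = len(name)
--
--     i = 0
--     while completed_count < N:
--         letter = name[i]
--
--         total_moves += move_vertical(letter)
--         my_name[i] = letter
--
--         if "".join(my_name) == name:
--             break
--
--         horizontal_move_amt, i = move_horizontal(i, name, my_name, N)
--         total_moves += horizontal_move_amt
--
--
--     answer = total_moves
--     return answer
--
-- def move_vertical(letter):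
--     # find which has closer distance
--     distance_up = ord(letter) - ord("A")
--     distance_down = ord("Z") - ord(letter) + 1
--
--     return distance_up if distance_up < distance_down else distance_down
--
-- def move_horizontal(i, name, my_name, N):
--     # find closest non-filled letter to left and its index
--     i_left = i - 1
--     distance_left = 1
--     while distance_left % N != 0:
--         if name[i_left] != my_name[i_left]:
--             break
--         i_left -= 1
--         distance_left += 1
--
--     # find closest non-filled letter to right and its index
--     i_right = i + 1
--     distance_right = 1
--     while distance_right % N != 0:
--         if name[i_right % N] != my_name[i_right % N]:
--             break
--         i_right += 1
--         distance_right += 1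
--
--     distance = distance_left if distance_left < distance_right else distance_right
--     index = i_left if distance_left < distance_right else i_right
--     return distance, index
-- ===== SOURCE B (Python) =====
-- def solution(name):
--     # Two-pointer consumption of the sorted non-'A' positions: the vertical
--     # cost is a closed-form sum; the greedy always jumps to either the smallest
--     # or the largest still-untyped position, so two indices into a precomputed
--     # array replace A's repeated character-by-character rescans.
--     N = len(name)
--     total = sum(min(ord(c) - ord("A"), ord("Z") - ord(c) + 1) for c in name)
--     pos = [j for j in range(1, N) if name[j] != "A"]
--     lo, hi, p = 0, len(pos) - 1, 0
--     while lo <= hi: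
--         dl = (p - pos[hi]) % N
--         dr = (pos[lo] - p) % N
--         if dl < dr:
--             total += dl
--             p = pos[hi]
--             hi -= 1
--         else:
--             total += dr
--             p = pos[lo]
--             lo += 1
--     return total
-- ===== Notes on version B (the rewrite author's own statement) =====
-- stated objective: faster
-- what changed: A simulates typing: it mutates a list copy, rescans it character by character in both directions and re-joins/compares the whole string every iteration; B computes the vertical cost as one closed-form sum and consumes a precomputed sorted array of non-'A' positions with two index pointers (lo/hi) and modular distance arithmetic, never touching a simulated string.
import Mathlib
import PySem

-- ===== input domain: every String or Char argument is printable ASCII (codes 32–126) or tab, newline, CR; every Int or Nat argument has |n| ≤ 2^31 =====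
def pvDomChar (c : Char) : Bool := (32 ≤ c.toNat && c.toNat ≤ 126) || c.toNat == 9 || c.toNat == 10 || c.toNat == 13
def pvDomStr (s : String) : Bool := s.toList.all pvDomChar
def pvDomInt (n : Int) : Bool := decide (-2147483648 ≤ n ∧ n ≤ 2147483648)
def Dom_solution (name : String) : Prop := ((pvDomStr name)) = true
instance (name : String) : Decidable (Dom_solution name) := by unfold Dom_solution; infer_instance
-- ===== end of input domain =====

-- B replaces A's simulated-typing loop (mutated list copy, per-step character rescans in
-- both directions, per-step join-and-compare) by a closed-form sum for the vertical moves
-- plus a two-pointer consumption of the precomputed sorted array of non-'A' positions.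

-- ===== PORT A =====
-- move_vertical(letter)
def moveVertical (letter : Char) : Int :=
  let distance_up : Int := (letter.toNat : Int) - ('A'.toNat : Int)
  let distance_down : Int := ('Z'.toNat : Int) - (letter.toNat : Int) + 1
  if distance_up < distance_down then distance_up else distance_down

-- first while-loop of move_horizontal; one fuel unit per condition check (fuel = N always
-- suffices: distance_left reaches N after N-1 body steps and the condition then fails).
-- pyGet? is Python's indexing (negative index wraps once); the scans are proved to stay
-- in range on every state A reaches, so the `none = none` comparison branch is never taken.
def leftScan (nameL myName : List Char) (N : Nat) : Nat → Int → Int → Int × Int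
  | 0, i_left, distance_left => (distance_left, i_left)
  | fuel+1, i_left, distance_left =>
    if PySem.Int.mod distance_left (N : Int) ≠ 0 then
      if PySem.List.pyGet? nameL i_left ≠ PySem.List.pyGet? myName i_left then
        (distance_left, i_left)
      else leftScan nameL myName N fuel (i_left - 1) (distance_left + 1)
    else (distance_left, i_left)

-- second while-loop of move_horizontal (indexes with i_right % N like the Python)
def rightScan (nameL myName : List Char) (N : Nat) : Nat → Int → Int → Int × Int
  | 0, i_right, distance_right => (distance_right, i_right)
  | fuel+1, i_right, distance_right =>
    if PySem.Int.mod distance_right (N : Int) ≠ 0 then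
      if PySem.List.pyGet? nameL (PySem.Int.mod i_right (N : Int)) ≠
         PySem.List.pyGet? myName (PySem.Int.mod i_right (N : Int)) then
        (distance_right, i_right)
      else rightScan nameL myName N fuel (i_right + 1) (distance_right + 1)
    else (distance_right, i_right)

-- move_horizontal(i, name, my_name, N)
def moveHorizontal (i : Int) (nameL myName : List Char) (N : Nat) : Int × Int :=
  let l := leftScan nameL myName N N (i - 1) 1
  let r := rightScan nameL myName N N (i + 1) 1
  if l.1 < r.1 then (l.1, l.2) else (r.1, r.2)

-- the main while-loop (completed_count stays 0, so its condition is 0 < N each time);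
-- one fuel unit per iteration, fuel = N+1 always suffices (each iteration after the first
-- fills a distinct previously unfilled position).  name[i] is proved in range on every
-- reachable state, so the `.getD 'A'` default is never taken; my_name[i] = letter is pySetD.
def loopA (nameL : List Char) (N : Nat) : Nat → List Char → Int → Int → Int
  | 0, _, _, total_moves => total_moves
  | fuel+1, my_name, i, total_moves =>
    if (0 : Int) < (N : Int) then
      let letter := (PySem.List.pyGet? nameL i).getD 'A'
      let total1 := total_moves + moveVertical letter
      let my_name1 := PySem.List.pySetD my_name i letter
      if my_name1 = nameL then total1
      else
        let r := moveHorizontal i nameL my_name1 N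
        loopA nameL N fuel my_name1 r.2 (total1 + r.1)
    else total_moves

def solution (name : String) : Int :=
  let nameL := name.toList
  let N := nameL.length
  loopA nameL N (N + 1) (List.replicate N 'A') 0 0

-- ===== PORT B =====
-- min(ord(c) - ord("A"), ord("Z") - ord(c) + 1)
def vmin (c : Char) : Int :=
  min ((c.toNat : Int) - ('A'.toNat : Int)) (('Z'.toNat : Int) - (c.toNat : Int) + 1)

-- the two-pointer while-loop of B; one fuel unit per iteration (fuel = len(pos) suffices:
-- each iteration moves lo up or hi down).  pos[lo]/pos[hi] are proved in range on every
-- reachable state, so the `.getD 0` default is never taken.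
def loopB (N : Nat) (pos : List Int) : Nat → Int → Int → Int → Int → Int
  | 0, _, _, _, total => total
  | fuel+1, lo, hi, p, total =>
    if lo ≤ hi then
      let dl := PySem.Int.mod (p - (PySem.List.pyGet? pos hi).getD 0) (N : Int)
      let dr := PySem.Int.mod ((PySem.List.pyGet? pos lo).getD 0 - p) (N : Int)
      if dl < dr then
        loopB N pos fuel lo (hi - 1) ((PySem.List.pyGet? pos hi).getD 0) (total + dl)
      else
        loopB N pos fuel (lo + 1) hi ((PySem.List.pyGet? pos lo).getD 0) (total + dr)
    else total

def solution_alt (name : String) : Int :=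
  let l := name.toList
  let N := l.length
  let total := (l.map vmin).sum
  let pos := (PySem.List.pyRange 1 (N : Int) 1).filter
               (fun j => PySem.List.pyGet? l j ≠ some 'A')
  loopB N pos pos.length 0 ((pos.length : Int) - 1) 0 total

-- ===== PRECONDITION & SPEC =====
def Spec_solution (name : String) (out : Int) : Prop := out = solution_alt name
instance (name : String) (out : Int) : Decidable (Spec_solution name out) := by unfold Spec_solution; infer_instance

-- ===== CLAIM (what is proved, stated in full; the proofs are below) =====
def Claim_equal_solution : Prop := ∀ (name : String), Dom_solution name → Spec_solution name (solution name)

-- ===== LEMMAS AND PROOFS =====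
-- ---------- helper definitions used only by the proofs ----------

-- the typed string after the positions of the circular window [m, M] have been typed
def canonName (l : List Char) (m M : Int) : List Char :=
  (List.range l.length).map
    (fun (j : Nat) => if (j : Int) ≤ M ∨ m + (l.length : Int) ≤ (j : Int) then l.getD j 'A' else 'A')

-- the positions that still have to be typed, in increasing order
def remOf (l : List Char) (m M : Int) : List Int :=
  (PySem.List.pyRange 0 (l.length : Int) 1).filter
    (fun j => decide (M < j) && decide (j < m + (l.length : Int)) && decide (l.getD j.toNat 'A'  ≠  'A'))

lemma canonName_length (l : List Char) (m M : Int) : (canonName l m M).length = l.length := by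
  simp [canonName]

lemma canonName_getD (l : List Char) (m M : Int) (j : Nat) (hj : j < l.length) :
    (canonName l m M).getD j 'A'
      = if (j : Int)  ≤  M  ∨  m + (l.length : Int)  ≤  (j : Int) then l.getD j 'A' else 'A' := by
  unfold canonName
  rw [List.getD_eq_getElem _ _ (by simpa using hj)]
  simp [hj, List.getD_eq_getElem?_getD]


lemma canonName_getElem (l : List Char) (m M : Int) (j : Nat) (hj : j < (canonName l m M).length) :
    (canonName l m M)[j]
      = if (j : Int) ≤ M ∨ m + (l.length : Int) ≤ (j : Int) then l.getD j 'A' else 'A' := by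
  rw [← List.getD_eq_getElem _ 'A' hj, canonName_getD l m M j (by simpa [canonName_length] using hj)]

lemma mem_remOf (l : List Char) (m M q : Int) :
    q ∈ remOf l m M ↔
      (0  ≤  q  ∧  q < (l.length : Int))  ∧  M < q  ∧  q < m + (l.length : Int)  ∧ 
        l.getD q.toNat 'A'  ≠  'A' := by
  unfold remOf
  rw [List.mem_filter, PySem.List.mem_pyRange_one]
  simp only [Bool.and_eq_true, decide_eq_true_eq]
  tauto

lemma canon_ne_iff_nat (l : List Char) (m M : Int) (j : Nat) (hj : j < l.length) :
    (l.getD j 'A' ≠ (canonName l m M).getD j 'A') ↔ ((j : Int) ∈ remOf l m M) := by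
  rw [canonName_getD l m M j hj, mem_remOf]
  by_cases hW : ((j : Int) ≤ M ∨ m + (l.length : Int) ≤ (j : Int))
  · rw [if_pos hW]
    constructor
    · intro h
      exact absurd rfl h
    · rintro ⟨_, h1, h2, _⟩
      omega
  · rw [if_neg hW]
    constructor
    · intro h
      refine ⟨⟨by omega, by omega⟩, by omega, by omega, ?_⟩
      intro hA
      exact h (by rw [Int.toNat_natCast] at hA; rw [hA])
    · rintro ⟨_, _, _, hA⟩
      rw [Int.toNat_natCast] at hA
      intro h
      exact hA h

lemma remOf_sorted (l : List Char) (m M : Int) : (remOf l m M).Pairwise (· < ·) := by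
  unfold remOf
  apply List.Pairwise.filter
  rw [PySem.List.pyRange_zero_natCast]
  exact (List.pairwise_map.mpr (by simpa using List.pairwise_lt_range))

lemma remOf_nodup (l : List Char) (m M : Int) : (remOf l m M).Nodup :=
  (remOf_sorted l m M).nodup

lemma pairwise_le_getLast {xs : List Int} (hs : xs.Pairwise (· < ·)) (h : xs  ≠  [])
    {q : Int} (hq : q ∈ xs) : q  ≤  xs.getLast h := by
  induction xs with
  | nil => exact absurd rfl h
  | cons x t ih =>
      rcases List.mem_cons.mp hq with rfl | hq'
      · by_cases ht : t = []
        · subst ht; simp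
        · rw [List.getLast_cons ht]
          exact le_of_lt ((List.pairwise_cons.mp hs).1 _ (List.getLast_mem ht))
      · have ht : t ≠ [] := List.ne_nil_of_mem hq'
        rw [List.getLast_cons ht]
        exact ih (List.pairwise_cons.mp hs).2 ht hq'

lemma pairwise_head_le {xs : List Int} (hs : xs.Pairwise (· < ·)) (h : xs  ≠  [])
    {q : Int} (hq : q ∈ xs) : xs.head h  ≤  q := by
  induction xs with
  | nil => exact absurd rfl h
  | cons x t ih =>
      rcases List.mem_cons.mp hq with rfl | hq'
      · simp
      · exact le_of_lt ((List.pairwise_cons.mp hs).1 _ hq')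

-- python read at an in-range (possibly negative) raw index
lemma read_nonneg {α : Type} [Inhabited α] (xs : List α) (r : Int) (h0 : 0  ≤  r)
    (h1 : r < (xs.length : Int)) :
    PySem.List.pyGet? xs r = some (xs.getD r.toNat default) := by
  rw [PySem.List.pyGet?_of_nonneg (h := h0)]
  rw [List.getD_eq_getElem?_getD, List.getElem?_eq_getElem (by omega)]
  rfl

lemma read_neg {α : Type} [Inhabited α] (xs : List α) (r : Int)
    (h0 : -(xs.length : Int)  ≤  r) (h1 : r < 0) :
    PySem.List.pyGet? xs r = some (xs.getD (r + xs.length).toNat default) := by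
  unfold PySem.List.pyGet? PySem.List.pyIdx?
  rw [if_neg (by omega), if_pos h0]
  have hk : xs.length - (-r).toNat = (r + xs.length).toNat := by omega
  rw [hk]
  show xs[(r + xs.length).toNat]? = _
  rw [List.getD_eq_getElem?_getD, List.getElem?_eq_getElem (by omega)]
  rfl

lemma emod_small_nonneg {r L : Int} (h0 : 0 ≤ r) (h1 : r < L) : r % L = r :=
  Int.emod_eq_of_lt h0 h1

lemma emod_small_neg {r L : Int} (h0 : -L ≤ r) (h1 : r < 0) : r % L = r + L := by
  have h2 : (r + L * 1) % L = r % L := Int.add_mul_emod_self_left r L 1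
  have h3 : (r + L) % L = r + L := Int.emod_eq_of_lt (by omega) (by omega)
  calc r % L = (r + L * 1) % L := h2.symm
    _ = r + L := by rw [mul_one, h3]

-- python write at an in-range (possibly negative) raw index
lemma write_inrange (xs : List Char) (r : Int) (v : Char)
    (h0 : -(xs.length : Int)  ≤  r) (h1 : r < (xs.length : Int)) :
    PySem.List.pySetD xs r v = xs.set (r % (xs.length : Int)).toNat v := by
  unfold PySem.List.pySetD PySem.List.pySet? PySem.List.pyIdx?
  by_cases hr : 0 ≤ r
  · rw [if_pos hr, if_pos h1]
    rw [emod_small_nonneg hr h1]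
    rfl
  · rw [if_neg hr, if_pos h0]
    rw [emod_small_neg h0 (by omega)]
    have : (r + (xs.length : Int)).toNat = xs.length - (-r).toNat := by omega
    rw [this]
    rfl

-- a raw read differs between name and the canonical typed string iff the position is untyped
lemma read_ne_iff (l : List Char) (m M r : Int)
    (h0 : -(l.length : Int)  ≤  r) (h1 : r < (l.length : Int)) :
    (PySem.List.pyGet? l r  ≠  PySem.List.pyGet? (canonName l m M) r) ↔
      (r % (l.length : Int)) ∈ remOf l m M := by
  have hL : 0 < l.length := by omega
  have hclen : (canonName l m M).length = l.length := canonName_length l m M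
  by_cases hr : 0 ≤ r
  · rw [read_nonneg l r hr h1, read_nonneg (canonName l m M) r hr (by rw [hclen]; exact h1)]
    rw [emod_small_nonneg hr h1]
    have hd : (default : Char) = 'A' := rfl
    rw [hd]
    simp only [ne_eq, Option.some.injEq]
    have := canon_ne_iff_nat l m M r.toNat (by omega)
    rw [show ((r.toNat : Nat) : Int) = r by omega] at this
    exact this
  · rw [read_neg l r h0 (by omega),
        read_neg (canonName l m M) r (by rw [hclen]; exact h0) (by omega)]
    rw [hclen, emod_small_neg h0 (by omega)]
    have hd : (default : Char) = 'A' := rfl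
    rw [hd]
    simp only [ne_eq, Option.some.injEq]
    have := canon_ne_iff_nat l m M (r + (l.length : Int)).toNat (by omega)
    rw [show (((r + (l.length : Int)).toNat : Nat) : Int) = r + (l.length : Int) by omega] at this
    exact this

lemma canonName_done_iff (l : List Char) (m M : Int) (hm : m  ≤  0) (hM : 0  ≤  M) :
    canonName l m M = l ↔ remOf l m M = [] := by
  constructor
  · intro hEq
    rw [List.eq_nil_iff_forall_not_mem]
    intro q hq
    have hb := (mem_remOf l m M q).mp hq
    have hj : q.toNat < l.length := by omega
    have := (canon_ne_iff_nat l m M q.toNat hj).mpr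
      (by rw [show ((q.toNat : Nat) : Int) = q by omega]; exact hq)
    rw [hEq] at this
    exact this rfl
  · intro hNil
    apply List.ext_getElem (canonName_length l m M)
    intro j h1 h2
    rw [canonName_getElem l m M j h1]
    by_cases hW : ((j : Int) ≤ M ∨ m + (l.length : Int) ≤ (j : Int))
    · rw [if_pos hW, List.getD_eq_getElem _ 'A' h2]
    · rw [if_neg hW]
      have hnm : ((j : Int)) ∉ remOf l m M := by rw [hNil]; exact List.not_mem_nil
      rw [mem_remOf] at hnm
      have hA : l.getD j 'A' = 'A' := by
        by_contra hA
        exact hnm ⟨⟨by omega, by omega⟩, by omega, by omega,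
          by rw [Int.toNat_natCast]; exact hA⟩
      rw [List.getD_eq_getElem _ 'A' h2] at hA
      rw [hA]

-- the left while-loop finds the first untyped position to the left
lemma leftScan_go (l myName : List Char) (i : Int) (D : Int) (hD1 : 1  ≤  D)
    (hDN : D  ≤  (l.length : Int) - 1)
    (hmiss : ∀ d : Int, 1  ≤  d → d < D →
      PySem.List.pyGet? l (i - d) = PySem.List.pyGet? myName (i - d))
    (hhit : PySem.List.pyGet? l (i - D)  ≠  PySem.List.pyGet? myName (i - D)) :
    ∀ (fuel : Nat) (dist : Int), 1  ≤  dist → dist  ≤  D → D - dist < (fuel : Int) →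
      leftScan l myName l.length fuel (i - dist) dist = (D, i - D) := by
  intro fuel
  induction fuel with
  | zero => intro dist _ h2 h3; exfalso; push_cast at h3; omega
  | succ f ih =>
      intro dist h1 h2 h3
      have hL : (2 : Int) ≤ (l.length : Int) := by omega
      have hmod : PySem.Int.mod dist (l.length : Int) = dist := by
        rw [PySem.Int.mod_eq_emod_of_pos (by omega)]
        exact emod_small_nonneg (by omega) (by omega)
      rw [leftScan]
      rw [if_pos (by rw [hmod]; omega)]
      by_cases hD : dist = D
      · subst hD
        rw [if_pos hhit]
      · have hlt : dist < D := by omega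
        rw [if_neg (by
          intro hne
          exact hne (hmiss dist h1 hlt))]
        have : i - dist - 1 = i - (dist + 1) := by ring
        rw [this]
        exact ih (dist + 1) (by omega) (by omega) (by push_cast at h3 ⊢; omega)

lemma rightScan_go (l myName : List Char) (i : Int) (D : Int) (hD1 : 1  ≤  D)
    (hDN : D  ≤  (l.length : Int) - 1)
    (hmiss : ∀ d : Int, 1  ≤  d → d < D →
      PySem.List.pyGet? l ((i + d) % (l.length : Int)) =
        PySem.List.pyGet? myName ((i + d) % (l.length : Int)))
    (hhit : PySem.List.pyGet? l ((i + D) % (l.length : Int))  ≠ 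
        PySem.List.pyGet? myName ((i + D) % (l.length : Int))) :
    ∀ (fuel : Nat) (dist : Int), 1  ≤  dist → dist  ≤  D → D - dist < (fuel : Int) →
      rightScan l myName l.length fuel (i + dist) dist = (D, i + D) := by
  intro fuel
  induction fuel with
  | zero => intro dist _ h2 h3; exfalso; push_cast at h3; omega
  | succ f ih =>
      intro dist h1 h2 h3
      have hL : (2 : Int) ≤ (l.length : Int) := by omega
      have hmod : PySem.Int.mod dist (l.length : Int) = dist := by
        rw [PySem.Int.mod_eq_emod_of_pos (by omega)]
        exact emod_small_nonneg (by omega) (by omega)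
      have hmodi : PySem.Int.mod (i + dist) (l.length : Int) = (i + dist) % (l.length : Int) :=
        PySem.Int.mod_eq_emod_of_pos (by omega)
      rw [rightScan]
      rw [if_pos (by rw [hmod]; omega)]
      by_cases hD : dist = D
      · subst hD
        rw [hmodi]
        rw [if_pos hhit]
      · have hlt : dist < D := by omega
        rw [hmodi]
        rw [if_neg (by
          intro hne
          exact hne (hmiss dist h1 hlt))]
        have : i + dist + 1 = i + (dist + 1) := by ring
        rw [this]
        exact ih (dist + 1) (by omega) (by omega) (by push_cast at h3 ⊢; omega)

-- move_horizontal on a reachable state: jump to the nearest untyped position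
lemma mh_spec (l : List Char) (m M i : Int)
    (hm : m  ≤  0) (hM : 0  ≤  M) (hw : M - m  ≤  (l.length : Int) - 1) (hi : i = m  ∨  i = M)
    (hne : remOf l m M  ≠  []) :
    moveHorizontal i l (canonName l m M) l.length =
      (if i + (l.length : Int) - (remOf l m M).getLast hne < (remOf l m M).head hne - i
       then (i + (l.length : Int) - (remOf l m M).getLast hne,
             (remOf l m M).getLast hne - (l.length : Int))
       else ((remOf l m M).head hne - i, (remOf l m M).head hne)) := by
  have hrhi_mem := List.getLast_mem hne
  have hrlo_mem := List.head_mem hne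
  have hrhi_b := (mem_remOf l m M _).mp hrhi_mem
  have hrlo_b := (mem_remOf l m M _).mp hrlo_mem
  have hmax : ∀ q ∈ remOf l m M, q ≤ (remOf l m M).getLast hne :=
    fun q hq => pairwise_le_getLast (remOf_sorted l m M) hne hq
  have hmin : ∀ q ∈ remOf l m M, (remOf l m M).head hne ≤ q :=
    fun q hq => pairwise_head_le (remOf_sorted l m M) hne hq
  set L : Int := (l.length : Int) with hLdef
  set rhi : Int := (remOf l m M).getLast hne with hrhidef
  set rlo : Int := (remOf l m M).head hne with hrlodef
  have him : m ≤ i ∧ i ≤ M := by rcases hi with rfl | rfl <;> omega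
  have hL : 0 < L := by omega
  set Dl : Int := i + L - rhi with hDl
  set Dr : Int := rlo - i with hDr
  have hDl1 : 1 ≤ Dl := by omega
  have hDlN : Dl ≤ L - 1 := by omega
  have hDr1 : 1 ≤ Dr := by omega
  have hDrN : Dr ≤ L - 1 := by omega
  have hleft : leftScan l (canonName l m M) l.length l.length (i - 1) 1 = (Dl, i - Dl) := by
    apply leftScan_go l (canonName l m M) i Dl hDl1 hDlN
    · intro d hd1 hd2
      by_contra hne'
      have hj := (read_ne_iff l m M (i - d) (by omega) (by omega)).mp hne'
      by_cases h' : 0 ≤ i - d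
      · rw [emod_small_nonneg h' (by omega)] at hj
        have := (mem_remOf l m M _).mp hj
        omega
      · rw [emod_small_neg (by omega) (by omega)] at hj
        have h1 := (mem_remOf l m M _).mp hj
        have h2 := hmax _ hj
        omega
    · apply (read_ne_iff l m M (i - Dl) (by omega) (by omega)).mpr
      rw [emod_small_neg (by omega) (by omega)]
      rw [show i - Dl + L = rhi by ring]
      exact hrhi_mem
    · omega
    · omega
    · push_cast
      omega
  have hright : rightScan l (canonName l m M) l.length l.length (i + 1) 1 = (Dr, i + Dr) := by
    apply rightScan_go l (canonName l m M) i Dr hDr1 hDrN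
    · intro d hd1 hd2
      by_cases h' : 0 ≤ i + d
      · rw [emod_small_nonneg h' (by omega)]
        by_contra hne'
        have hj := (read_ne_iff l m M (i + d) (by omega) (by omega)).mp hne'
        rw [emod_small_nonneg h' (by omega)] at hj
        have h1 := (mem_remOf l m M _).mp hj
        have h2 := hmin _ hj
        omega
      · rw [emod_small_neg (by omega) (by omega)]
        by_contra hne'
        have hj := (read_ne_iff l m M (i + d + L) (by omega) (by omega)).mp hne'
        rw [emod_small_nonneg (by omega) (by omega)] at hj
        have h1 := (mem_remOf l m M _).mp hj
        omega
    · rw [show i + Dr = rlo by ring, emod_small_nonneg (by omega) (by omega)]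
      apply (read_ne_iff l m M rlo (by omega) (by omega)).mpr
      rw [emod_small_nonneg (by omega) (by omega)]
      exact hrlo_mem
    · omega
    · omega
    · push_cast
      omega
  show (let lres := leftScan l (canonName l m M) l.length l.length (i - 1) 1
        let rres := rightScan l (canonName l m M) l.length l.length (i + 1) 1
        if lres.1 < rres.1 then (lres.1, lres.2) else (rres.1, rres.2)) = _
  rw [hleft, hright]
  show (if Dl < Dr then (Dl, i - Dl) else (Dr, i + Dr)) = _
  rw [show i - Dl = rhi - L by ring, show i + Dr = rlo by ring]

-- window update, left jump
lemma canon_set_left (l : List Char) (m M : Int) (hm : m  ≤  0) (hM : 0  ≤  M)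
    (hw : M - m  ≤  (l.length : Int) - 1) (hne : remOf l m M  ≠  [])
    (rhi : Int) (hrhi : rhi = (remOf l m M).getLast hne) :
    (canonName l (rhi - (l.length : Int)) M).set rhi.toNat 'A' = canonName l m M := by
  have hrhi_b := (mem_remOf l m M _).mp (hrhi ▸ List.getLast_mem hne)
  have hmax : ∀ q ∈ remOf l m M, q ≤ rhi :=
    fun q hq => hrhi ▸ pairwise_le_getLast (remOf_sorted l m M) hne hq
  apply List.ext_getElem (by simp [canonName_length])
  intro j h1 h2
  have hjl : j < l.length := by simpa [canonName_length] using h2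
  rw [List.getElem_set, canonName_getElem l m M j h2]
  by_cases hj : rhi.toNat = j
  · rw [if_pos hj, if_neg (by omega)]
  · rw [if_neg hj]
    rw [canonName_getElem l (rhi - (l.length : Int)) M j (by simpa [canonName_length, List.length_set] using h1)]
    by_cases hA : l.getD j 'A' = 'A'
    · rw [List.getD_eq_getElem?_getD] at hA
      split_ifs <;> simp [hA]
    · have hnotmem : ((j : Int) < m + (l.length : Int)) → (M < (j:Int)) → (j : Int) ≤ rhi := by
        intro hx hy
        exact hmax _ ((mem_remOf l m M _).mpr ⟨⟨by omega, by omega⟩, hy, hx,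
          by rw [Int.toNat_natCast]; exact hA⟩)
      split_ifs with hc1 hc2 hc2
      · rfl
      · exfalso
        have := hnotmem (by omega) (by omega)
        omega
      · exfalso
        omega
      · rfl

lemma remOf_left (l : List Char) (m M : Int) (hm : m  ≤  0) (hM : 0  ≤  M)
    (hne : remOf l m M  ≠  [])
    (rhi : Int) (hrhi : rhi = (remOf l m M).getLast hne) :
    remOf l (rhi - (l.length : Int)) M = (remOf l m M).erase rhi := by
  have hrhi_b := (mem_remOf l m M _).mp (hrhi ▸ List.getLast_mem hne)
  have hmax : ∀ q ∈ remOf l m M, q ≤ rhi :=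
    fun q hq => hrhi ▸ pairwise_le_getLast (remOf_sorted l m M) hne hq
  rw [(remOf_nodup l m M).erase_eq_filter rhi]
  unfold remOf
  rw [List.filter_filter]
  apply List.filter_congr
  intro j hj
  rw [PySem.List.mem_pyRange_one] at hj
  apply Bool.eq_iff_iff.mpr
  simp only [Bool.and_eq_true, decide_eq_true_eq, bne_iff_ne]
  by_cases hA : l.getD j.toNat 'A' = 'A'
  · have hA' := hA
    rw [List.getD_eq_getElem?_getD] at hA'
    simp [hA']
  · have himp : (M < j ∧ j < m + (l.length : Int)) → j ≤ rhi := by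
      rintro ⟨hy, hx⟩
      exact hmax _ ((mem_remOf l m M _).mpr ⟨⟨by omega, by omega⟩, hy, hx, hA⟩)
    constructor
    · rintro ⟨⟨h1, h2⟩, _⟩
      exact ⟨by omega, ⟨h1, by omega⟩, hA⟩
    · rintro ⟨hne', ⟨h1, h2⟩, _⟩
      have := himp ⟨h1, h2⟩
      exact ⟨⟨h1, by omega⟩, hA⟩

-- window update, right jump
lemma canon_set_right (l : List Char) (m M : Int) (hm : m  ≤  0) (hM : 0  ≤  M)
    (hw : M - m  ≤  (l.length : Int) - 1) (hne : remOf l m M  ≠  [])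
    (rlo : Int) (hrlo : rlo = (remOf l m M).head hne) :
    (canonName l m rlo).set rlo.toNat 'A' = canonName l m M := by
  have hrlo_b := (mem_remOf l m M _).mp (hrlo ▸ List.head_mem hne)
  have hmin : ∀ q ∈ remOf l m M, rlo ≤ q :=
    fun q hq => hrlo ▸ pairwise_head_le (remOf_sorted l m M) hne hq
  apply List.ext_getElem (by simp [canonName_length])
  intro j h1 h2
  have hjl : j < l.length := by simpa [canonName_length] using h2
  rw [List.getElem_set, canonName_getElem l m M j h2]
  by_cases hj : rlo.toNat = j
  · rw [if_pos hj, if_neg (by omega)]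
  · rw [if_neg hj]
    rw [canonName_getElem l m rlo j (by simpa [canonName_length, List.length_set] using h1)]
    by_cases hA : l.getD j 'A' = 'A'
    · rw [List.getD_eq_getElem?_getD] at hA
      split_ifs <;> simp [hA]
    · have hnotmem : ((j : Int) < m + (l.length : Int)) → (M < (j:Int)) → rlo ≤ (j : Int) := by
        intro hx hy
        exact hmin _ ((mem_remOf l m M _).mpr ⟨⟨by omega, by omega⟩, hy, hx,
          by rw [Int.toNat_natCast]; exact hA⟩)
      split_ifs with hc1 hc2 hc2
      · rfl
      · exfalso
        have := hnotmem (by omega) (by omega)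
        omega
      · exfalso
        have := hnotmem (by omega) (by omega)
        omega
      · rfl

lemma remOf_right (l : List Char) (m M : Int) (hm : m  ≤  0) (hM : 0  ≤  M)
    (hne : remOf l m M  ≠  [])
    (rlo : Int) (hrlo : rlo = (remOf l m M).head hne) :
    remOf l m rlo = (remOf l m M).erase rlo := by
  have hrlo_b := (mem_remOf l m M _).mp (hrlo ▸ List.head_mem hne)
  have hmin : ∀ q ∈ remOf l m M, rlo ≤ q :=
    fun q hq => hrlo ▸ pairwise_head_le (remOf_sorted l m M) hne hq
  rw [(remOf_nodup l m M).erase_eq_filter rlo]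
  unfold remOf
  rw [List.filter_filter]
  apply List.filter_congr
  intro j hj
  rw [PySem.List.mem_pyRange_one] at hj
  apply Bool.eq_iff_iff.mpr
  simp only [Bool.and_eq_true, decide_eq_true_eq, bne_iff_ne]
  by_cases hA : l.getD j.toNat 'A' = 'A'
  · have hA' := hA
    rw [List.getD_eq_getElem?_getD] at hA'
    simp [hA']
  · have himp : (M < j ∧ j < m + (l.length : Int)) → rlo ≤ j := by
      rintro ⟨hy, hx⟩
      exact hmin _ ((mem_remOf l m M _).mpr ⟨⟨by omega, by omega⟩, hy, hx, hA⟩)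
    constructor
    · rintro ⟨⟨h1, h2⟩, _⟩
      exact ⟨by omega, ⟨by omega, h2⟩, hA⟩
    · rintro ⟨hne', ⟨h1, h2⟩, _⟩
      have := himp ⟨h1, h2⟩
      exact ⟨⟨by omega, h2⟩, hA⟩

lemma vmin_eq_moveVertical (c : Char) : moveVertical c = vmin c := by
  unfold moveVertical vmin
  simp only [min_def]
  split_ifs <;> omega

-- ---------- slice lemmas for B's two-pointer view ----------

lemma slice_head (pos : List Int) (a c : Nat) (R : List Int)
    (hs : (pos.drop a).take c = R) (h : R ≠ []) :
    R.head h = pos.getD a 0 := by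
  subst hs
  have hlen : 0 < ((pos.drop a).take c).length := List.length_pos_iff.mpr h
  have ha : a < pos.length := by
    simp only [List.length_take, List.length_drop] at hlen
    omega
  rw [List.head_eq_getElem]
  rw [List.getElem_take, List.getElem_drop]
  rw [List.getD_eq_getElem _ _ (by omega)]
  simp

lemma slice_getLast (pos : List Int) (a c : Nat) (hc : a + c ≤ pos.length) (R : List Int)
    (hs : (pos.drop a).take c = R) (h : R ≠ []) :
    R.getLast h = pos.getD (a + c - 1) 0 := by
  subst hs
  have hlen : ((pos.drop a).take c).length = c := by
    simp only [List.length_take, List.length_drop]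
    omega
  have hc0 : 0 < c := by
    have := List.length_pos_iff.mpr h
    omega
  rw [List.getLast_eq_getElem]
  have hidx : ((pos.drop a).take c).length - 1 = c - 1 := by omega
  rw [List.getD_eq_getElem _ _ (by omega : a + c - 1 < pos.length)]
  simp only [List.getElem_take, List.getElem_drop]
  congr 1
  omega

lemma slice_tail (pos : List Int) (a c : Nat) (ha : a < pos.length) (hc : 0 < c) :
    ((pos.drop a).take c).tail = (pos.drop (a+1)).take (c-1) := by
  rcases Nat.exists_eq_succ_of_ne_zero (by omega : c ≠ 0) with ⟨c', rfl⟩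
  rw [List.drop_eq_getElem_cons ha, List.take_succ_cons, List.tail_cons]
  simp

lemma slice_dropLast (pos : List Int) (a c : Nat) (hc : a + c ≤ pos.length) :
    ((pos.drop a).take c).dropLast = (pos.drop a).take (c-1) := by
  rw [List.dropLast_eq_take, List.take_take]
  congr 1
  simp only [List.length_take, List.length_drop]
  omega

lemma erase_head {R : List Int} (h : R ≠ []) : R.erase (R.head h) = R.tail := by
  cases R with
  | nil => exact absurd rfl h
  | cons x t => simp [List.erase_cons_head]

lemma erase_getLast {R : List Int} (hnd : R.Nodup) (h : R ≠ []) :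
    R.erase (R.getLast h) = R.dropLast := by
  have hsplit : R.dropLast ++ [R.getLast h] = R := List.dropLast_concat_getLast h
  have hnm : R.getLast h ∉ R.dropLast := by
    have hnd' : (R.dropLast ++ [R.getLast h]).Nodup := by rw [hsplit]; exact hnd
    intro hmem
    exact (List.disjoint_of_nodup_append hnd') hmem (List.mem_singleton_self _)
  rw [show R.erase (R.getLast h) = (R.dropLast ++ [R.getLast h]).erase (R.getLast h) from by
    rw [hsplit]]
  rw [List.erase_append_right _ hnm, List.erase_cons_head, List.append_nil]

-- the two loops compute the same totals on related states
lemma bisim (l : List Char) :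
    ∀ (fuelA : Nat) (k : Nat) (m M i totalA totalB : Int) (pos : List Int) (lo hi : Int) (fuelB : Nat),
      m  ≤  0 → 0  ≤  M → M - m  ≤  (l.length : Int) - 1 → (i = m  ∨  i = M) →
      k = (remOf l m M).length → k < fuelA → k  ≤  fuelB →
      0  ≤  lo → hi < (pos.length : Int) → hi + 1 - lo = (k : Int) →
      (pos.drop lo.toNat).take (hi + 1 - lo).toNat = remOf l m M →
      totalB = totalA + vmin (l.getD (i % (l.length : Int)).toNat 'A')
             + ((remOf l m M).map (fun q => vmin (l.getD q.toNat 'A'))).sum →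
      loopA l l.length fuelA ((canonName l m M).set (i % (l.length : Int)).toNat 'A') i totalA
        = loopB l.length pos fuelB lo hi (i % (l.length : Int)) totalB := by
  intro fuelA
  induction fuelA with
  | zero =>
      intro k m M i totalA totalB pos lo hi fuelB hm hM hw hi' hk hkA hkB hlo hhi hlh hslice htot
      exact absurd hkA (by omega)
  | succ fA ih =>
      intro k m M i totalA totalB pos lo hi fuelB hm hM hw hi' hk hkA hkB hlo hhi hlh hslice htot
      have hL : 0 < l.length := by omega
      have hLi : (0 : Int) < (l.length : Int) := by omega
      have him : m ≤ i ∧ i ≤ M := by rcases hi' with rfl | rfl <;> omega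
      set L : Int := (l.length : Int) with hLdef
      -- the value read and typed this iteration
      have hletter : PySem.List.pyGet? l i = some (l.getD (i % L).toNat 'A') := by
        by_cases hio : 0 ≤ i
        · rw [emod_small_nonneg hio (by omega)]
          exact read_nonneg l i hio (by omega)
        · rw [emod_small_neg (by omega) (by omega)]
          exact read_neg l i (by omega) (by omega)
      have hpb : 0 ≤ i % L ∧ i % L < L := by
        by_cases hio : 0 ≤ i
        · rw [emod_small_nonneg hio (by omega)]; omega
        · rw [emod_small_neg (by omega) (by omega)]; omega
      have hpW : ((i % L) ≤ M ∨ m + L ≤ (i % L)) := by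
        by_cases hio : 0 ≤ i
        · rw [emod_small_nonneg hio (by omega)]
          omega
        · rw [emod_small_neg (by omega) (by omega)]
          rcases hi' with rfl | rfl <;> omega
      -- the write restores the canonical window string
      have hwrite :
          PySem.List.pySetD ((canonName l m M).set (i % L).toNat 'A') i (l.getD (i % L).toNat 'A')
            = canonName l m M := by
        have hlen : ((canonName l m M).set (i % L).toNat 'A').length = l.length := by
          simp [canonName_length]
        rw [write_inrange _ i _ (by rw [hlen]; omega) (by rw [hlen]; exact (by omega)), hlen]
        rw [List.set_set]
        apply List.ext_getElem (by simp [canonName_length])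
        intro j h1 h2
        rw [List.getElem_set]
        by_cases hj : (i % L).toNat = j
        · rw [if_pos hj, canonName_getElem l m M j h2, if_pos (by omega), hj]
        · rw [if_neg hj]
      simp only [loopA]
      rw [if_pos hLi, hletter]
      simp only [Option.getD_some]
      rw [vmin_eq_moveVertical, hwrite]
      by_cases hk0 : k = 0
      · -- nothing left to type: both sides stop
        have hnil : remOf l m M = [] :=
          List.eq_nil_of_length_eq_zero (by omega)
        rw [if_pos ((canonName_done_iff l m M hm hM).mpr hnil)]
        rw [hnil] at htot
        simp only [List.map_nil, List.sum_nil, add_zero] at htot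
        have hlohi : ¬ lo ≤ hi := by omega
        rcases fuelB with _ | fb
        · simp [loopB, htot]
        · simp only [loopB]
          rw [if_neg hlohi, htot]
      · -- at least one position left
        have hne : remOf l m M ≠ [] := by
          intro h
          rw [h] at hk
          simp at hk
          omega
        rw [if_neg (by
          intro h
          exact hne ((canonName_done_iff l m M hm hM).mp h))]
        rw [mh_spec l m M i hm hM hw hi' hne]
        have hrhi_mem := List.getLast_mem hne
        have hrlo_mem := List.head_mem hne
        have hrhi_b := (mem_remOf l m M _).mp hrhi_mem
        have hrlo_b := (mem_remOf l m M _).mp hrlo_mem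
        set rhi : Int := (remOf l m M).getLast hne with hrhidef
        set rlo : Int := (remOf l m M).head hne with hrlodef
        -- pointer bounds for B
        have hlohi : lo ≤ hi := by omega
        have hcount : (hi + 1 - lo).toNat = k := by omega
        have hrange : lo.toNat + (hi + 1 - lo).toNat ≤ pos.length := by omega
        -- pos[lo] = rlo, pos[hi] = rhi
        have hheadv : pos.getD lo.toNat 0 = rlo := by
          rw [hrlodef, slice_head pos lo.toNat (hi + 1 - lo).toNat _ hslice hne]
        have hlastv : pos.getD hi.toNat 0 = rhi := by
          rw [hrhidef, slice_getLast pos lo.toNat (hi + 1 - lo).toNat hrange _ hslice hne]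
          congr 1
          omega
        have hgetlo : PySem.List.pyGet? pos lo = some rlo := by
          rw [read_nonneg pos lo hlo (by omega)]
          rw [show (default : Int) = 0 from rfl, hheadv]
        have hgethi : PySem.List.pyGet? pos hi = some rhi := by
          rw [read_nonneg pos hi (by omega) hhi]
          rw [show (default : Int) = 0 from rfl, hlastv]
        rcases fuelB with _ | fb
        · omega
        · simp only [loopB]
          rw [if_pos hlohi, hgetlo, hgethi]
          simp only [Option.getD_some]
          have hdl : PySem.Int.mod (i % L - rhi) L = i + L - rhi := by
            by_cases hio : 0 ≤ i
            · have hiv : i % L = i := emod_small_nonneg hio (by omega)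
              rw [hiv, PySem.Int.mod_eq_emod_of_pos (by omega)]
              rw [emod_small_neg (by omega) (by omega)]
              ring
            · have hiv : i % L = i + L := emod_small_neg (by omega) (by omega)
              rw [hiv, PySem.Int.mod_eq_emod_of_pos (by omega)]
              exact emod_small_nonneg (by omega) (by omega)
          have hdr : PySem.Int.mod (rlo - i % L) L = rlo - i := by
            by_cases hio : 0 ≤ i
            · have hiv : i % L = i := emod_small_nonneg hio (by omega)
              rw [hiv, PySem.Int.mod_eq_emod_of_pos (by omega)]
              exact emod_small_nonneg (by omega) (by omega)
            · have him3 : i = m := by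
                rcases hi' with h | h
                · exact h
                · omega
              have hiv : i % L = i + L := emod_small_neg (by omega) (by omega)
              rw [hiv, PySem.Int.mod_eq_emod_of_pos (by omega)]
              rw [show rlo - (i + L) = rlo - i - L by ring]
              rw [emod_small_neg (by omega) (by omega)]
              ring
          rw [hdl, hdr]
          -- the sum over the remaining positions splits off the typed one
          have hsum : ∀ (t : Int), t ∈ remOf l m M →
              ((remOf l m M).map (fun q => vmin (l.getD q.toNat 'A'))).sum
                = vmin (l.getD t.toNat 'A')
                  + (((remOf l m M).erase t).map (fun q => vmin (l.getD q.toNat 'A'))).sum := by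
            intro t ht
            have hperm := (List.perm_cons_erase ht).map (fun q => vmin (l.getD q.toNat 'A'))
            rw [hperm.sum_eq]
            simp
          by_cases hcmp : i + L - rhi < rlo - i
          · rw [if_pos hcmp, if_pos hcmp]
            have herase : remOf l (rhi - L) M = (remOf l m M).erase rhi :=
              remOf_left l m M hm hM hne rhi hrhidef
            have hdroplast : (remOf l m M).erase rhi = (remOf l m M).dropLast := by
              rw [hrhidef]
              exact erase_getLast (remOf_nodup l m M) hne
            have hslice' : (pos.drop lo.toNat).take ((hi - 1) + 1 - lo).toNat
                = remOf l (rhi - L) M := by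
              rw [herase, hdroplast, ← hslice,
                 slice_dropLast pos lo.toNat (hi + 1 - lo).toNat hrange]
              congr 1
              omega
            have hmod' : (rhi - L) % L = rhi := by
              rw [emod_small_neg (by omega) (by omega)]
              ring
            have := ih (k - 1) (rhi - L) M (rhi - L)
              (totalA + vmin (l.getD (i % L).toNat 'A') + (i + L - rhi))
              (totalB + (i + L - rhi)) pos lo (hi - 1) fb
              (by omega) hM (by omega) (Or.inl rfl)
              (by rw [herase, List.length_erase, if_pos hrhi_mem]; omega)
              (by omega) (by omega) hlo (by omega) (by omega) hslice'
              (by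
                rw [hmod', herase, htot, hsum rhi hrhi_mem]
                ring)
            rw [hmod'] at this
            rw [canon_set_left l m M hm hM hw hne rhi hrhidef] at this
            exact this
          · rw [if_neg hcmp, if_neg hcmp]
            have herase : remOf l m rlo = (remOf l m M).erase rlo :=
              remOf_right l m M hm hM hne rlo hrlodef
            have htail : (remOf l m M).erase rlo = (remOf l m M).tail := by
              rw [hrlodef]
              exact erase_head hne
            have hslice' : (pos.drop (lo + 1).toNat).take (hi + 1 - (lo + 1)).toNat
                = remOf l m rlo := by
              have e1 : (lo + 1).toNat = lo.toNat + 1 := by omega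
              have e2 : (hi + 1 - (lo + 1)).toNat = (hi + 1 - lo).toNat - 1 := by omega
              rw [e1, e2, herase, htail, ← hslice,
                 slice_tail pos lo.toNat (hi + 1 - lo).toNat (by omega) (by omega)]
            have hmod' : rlo % L = rlo := emod_small_nonneg (by omega) (by omega)
            have := ih (k - 1) m rlo rlo
              (totalA + vmin (l.getD (i % L).toNat 'A') + (rlo - i))
              (totalB + (rlo - i)) pos (lo + 1) hi fb
              hm (by omega) (by omega) (Or.inr rfl)
              (by rw [herase, List.length_erase, if_pos hrlo_mem]; omega)
              (by omega) (by omega) (by omega) hhi (by omega) hslice'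
              (by
                rw [hmod', herase, htot, hsum rlo hrlo_mem]
                ring)
            rw [hmod'] at this
            rw [canon_set_right l m M hm hM hw hne rlo hrlodef] at this
            exact this

lemma init_myName (l : List Char) :
    List.replicate l.length 'A' = (canonName l 0 0).set 0 'A' := by
  have hlen : (canonName l 0 0).length = l.length := canonName_length l 0 0
  apply List.ext_getElem (by simpa using hlen.symm)
  intro j h1 h2
  unfold canonName
  simp only [List.getElem_replicate, List.getElem_set, List.getElem_map, List.getElem_range]
  rcases Nat.eq_zero_or_pos j with rfl | hj
  · simp
  · have hjl : j < l.length := by simpa [canonName] using h2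
    rw [if_neg (by omega), if_neg (by simp; omega)]

lemma init_rem (l : List Char) :
    (PySem.List.pyRange 1 (l.length : Int) 1).filter
        (fun j => PySem.List.pyGet? l j  ≠  some 'A') = remOf l 0 0 := by
  unfold remOf
  by_cases hl : l.length = 0
  · have h1 : PySem.List.pyRange 1 (l.length : Int) 1 = [] := by
      rw [List.eq_nil_iff_forall_not_mem]
      intro x hx
      rw [PySem.List.mem_pyRange_one] at hx
      omega
    have h2 : PySem.List.pyRange 0 (l.length : Int) 1 = [] := by
      rw [List.eq_nil_iff_forall_not_mem]
      intro x hx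
      rw [PySem.List.mem_pyRange_one] at hx
      omega
    rw [h1, h2]
    rfl
  · have hcons : PySem.List.pyRange 0 (l.length : Int) 1
        = 0 :: PySem.List.pyRange 1 (l.length : Int) 1 := by
      have := PySem.List.pyRange_one_cons (a := 0) (b := (l.length : Int)) (by omega)
      simpa using this
    rw [hcons, List.filter_cons]
    have hz : (decide ((0:Int) < 0) && decide ((0:Int) < 0 + (l.length : Int))
        && decide (l.getD (0:Int).toNat 'A' ≠ 'A')) = false := by simp
    rw [hz]
    simp only [Bool.false_eq_true, if_false]
    apply List.filter_congr
    intro j hj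
    rw [PySem.List.mem_pyRange_one] at hj
    rw [read_nonneg l j (by omega) (by omega)]
    simp only [zero_add, decide_eq_true_eq]
    have e1 : (decide ((0:Int) < j)) = true := by simp; omega
    have e2 : (decide (j < (l.length : Int))) = true := by simp; omega
    rw [e1, e2]
    simp

lemma remOf_length_le (l : List Char) (m M : Int) :
    (remOf l m M).length  ≤  l.length := by
  unfold remOf
  calc (List.filter _ (PySem.List.pyRange 0 (l.length : Int) 1)).length
      ≤ (PySem.List.pyRange 0 (l.length : Int) 1).length := List.length_filter_le _ _
    _ = l.length := by rw [PySem.List.pyRange_zero_natCast]; simp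

lemma sum_filter_split (R : List Int) (p : Int → Bool) (g : Int → Int)
    (hz : ∀ j ∈ R, p j = false → g j = 0) :
    (R.map g).sum = ((R.filter p).map g).sum := by
  induction R with
  | nil => rfl
  | cons x t ih =>
      rw [List.map_cons, List.sum_cons, List.filter_cons]
      by_cases hx : p x = true
      · rw [if_pos hx, List.map_cons, List.sum_cons, ih (fun j hj => hz j (List.mem_cons_of_mem _ hj))]
      · rw [if_neg hx, hz x (List.mem_cons_self) (by simpa using hx),
           ih (fun j hj => hz j (List.mem_cons_of_mem _ hj)), zero_add]

lemma init_total (l : List Char) :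
    (l.map vmin).sum = vmin (l.getD 0 'A')
      + ((remOf l 0 0).map (fun q => vmin (l.getD q.toNat 'A'))).sum  ∨  l = [] := by
  by_cases hl : l = []
  · right; exact hl
  · left
    have hL : 0 < l.length := List.length_pos_iff.mpr hl
    have hmapeq : l.map vmin
        = (PySem.List.pyRange 0 (l.length : Int) 1).map (fun q => vmin (l.getD q.toNat 'A')) := by
      rw [PySem.List.pyRange_zero_natCast, List.map_map]
      apply List.ext_getElem (by simp)
      intro j h1 h2
      simp [List.getD_eq_getElem, (by simpa using h1 : j < l.length)]
    rw [hmapeq]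
    have hcons : PySem.List.pyRange 0 (l.length : Int) 1
        = 0 :: PySem.List.pyRange 1 (l.length : Int) 1 := by
      have := PySem.List.pyRange_one_cons (a := 0) (b := (l.length : Int)) (by omega)
      simpa using this
    rw [hcons, List.map_cons, List.sum_cons]
    have hsplit := sum_filter_split (PySem.List.pyRange 1 (l.length : Int) 1)
      (fun j => decide ((0:Int) < j) && decide (j < 0 + (l.length : Int))
        && decide (l.getD j.toNat 'A' ≠ 'A'))
      (fun q => vmin (l.getD q.toNat 'A'))
      (by
        intro j hj hf
        rw [PySem.List.mem_pyRange_one] at hj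
        simp only [Bool.and_eq_true, decide_eq_true_eq, not_and] at hf
        have hA : l.getD j.toNat 'A' = 'A' := by
          by_cases hA' : l.getD j.toNat 'A' = 'A'
          · exact hA'
          · exfalso
            rw [show (decide ((0:Int) < j)) = true by simp; omega,
               show (decide (j < 0 + (l.length : Int))) = true by simp; omega,
               show (decide (l.getD j.toNat 'A' ≠ 'A')) = true by simpa using hA'] at hf
            simp at hf
        show vmin (l.getD j.toNat 'A') = 0
        rw [hA]
        decide)
    rw [hsplit]
    have hrem : remOf l 0 0
        = (PySem.List.pyRange 1 (l.length : Int) 1).filter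
            (fun j => decide ((0:Int) < j) && decide (j < 0 + (l.length : Int))
              && decide (l.getD j.toNat 'A' ≠ 'A')) := by
      unfold remOf
      rw [hcons, List.filter_cons]
      have hz : (decide ((0:Int) < 0) && decide ((0:Int) < 0 + (l.length : Int))
          && decide (l.getD (0:Int).toNat 'A' ≠ 'A')) = false := by simp
      rw [hz]
      simp
    rw [hrem, ← hsplit]
    norm_num


-- ===== VERDICT (by name: the statement is the Claim_ definition above) =====
theorem solution_spec : Claim_equal_solution := by
  intro name _
  show solution name = solution_alt name
  show loopA name.toList name.toList.length (name.toList.length + 1)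
        (List.replicate name.toList.length 'A') 0 0
      = loopB name.toList.length
          ((PySem.List.pyRange 1 (name.toList.length : Int) 1).filter
            (fun j => PySem.List.pyGet? name.toList j ≠ some 'A'))
          ((PySem.List.pyRange 1 (name.toList.length : Int) 1).filter
            (fun j => PySem.List.pyGet? name.toList j ≠ some 'A')).length
          0
          ((((PySem.List.pyRange 1 (name.toList.length : Int) 1).filter
            (fun j => PySem.List.pyGet? name.toList j ≠ some 'A')).length : Int) - 1)
          0 ((name.toList.map vmin).sum)
  by_cases hnil : name.toList = []
  · simp only [hnil]
    rfl
  · have hlen : 0 < name.toList.length := List.length_pos_iff.mpr hnil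
    rw [init_rem name.toList]
    rcases init_total name.toList with htot | h
    · have h0 : (0 : Int) % (name.toList.length : Int) = 0 := Int.zero_emod _
      have hslice0 : ((remOf name.toList 0 0).drop (0 : Int).toNat).take
          ((((remOf name.toList 0 0).length : Int) - 1) + 1 - 0).toNat = remOf name.toList 0 0 := by
        simp
      have hb := bisim name.toList (name.toList.length + 1) (remOf name.toList 0 0).length
        0 0 0 0 ((name.toList.map vmin).sum) (remOf name.toList 0 0) 0
        (((remOf name.toList 0 0).length : Int) - 1) (remOf name.toList 0 0).length
        le_rfl le_rfl (by omega) (Or.inl rfl) rfl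
        (by have := remOf_length_le name.toList 0 0; omega)
        le_rfl le_rfl (by omega) (by omega) hslice0
        (by rw [htot, h0]; simp)
      rw [h0] at hb
      rw [init_myName name.toList]
      exact hb
    · exact absurd h hnil
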